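-- pv_equiv track=rewrite | github.com/obadx/qdat_bench | eval_results.py | group_metrics_for_violin_plots
-- ===== SOURCE A (Python) =====
-- def group_metrics_for_violin_plots(metric_names: list[str]) -> dict[str, list[str]]:
--     per_metrics = []
--     rmse_metrics = []
--     percentage_metrics = []
--     for name in metric_names:
--         name_lower = name.lower()
--         if "per_" in name_lower or "average_per" in name_lower:
--             per_metrics.append(name)
--         elif "_rmse" in name_lower:
--             rmse_metrics.append(name)
--         elif any(x in name_lower for x in ["recall", "precision", "f1", "accuracy"]):
--             percentage_metrics.append(name)
--     return {
--         "per_metrics": sorted(per_metrics),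
--         "rmse_metrics": sorted(rmse_metrics),
--         "percentage_metrics": sorted(percentage_metrics),
--     }
-- ===== SOURCE B (Python) =====
-- def _category(name):
--     nl = name.lower()
--     if "per_" in nl or "average_per" in nl:
--         return "per_metrics"
--     if "_rmse" in nl:
--         return "rmse_metrics"
--     if any(x in nl for x in ("recall", "precision", "f1", "accuracy")):
--         return "percentage_metrics"
--     return None
--
-- def group_metrics_for_violin_plots(metric_names: list[str]) -> dict[str, list[str]]:
--     ordered = sorted(metric_names)
--     return {
--         key: [n for n in ordered if _category(n) == key]
--         for key in ("per_metrics", "rmse_metrics", "percentage_metrics")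
--     }
-- ===== Notes on version B (the rewrite author's own statement) =====
-- stated objective: alternative
-- what changed: Replaces the single classification loop plus three per-bucket sorts by one global sort followed by a pure classifier helper and three filter comprehensions, so no per-bucket sort is needed.
import Mathlib
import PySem

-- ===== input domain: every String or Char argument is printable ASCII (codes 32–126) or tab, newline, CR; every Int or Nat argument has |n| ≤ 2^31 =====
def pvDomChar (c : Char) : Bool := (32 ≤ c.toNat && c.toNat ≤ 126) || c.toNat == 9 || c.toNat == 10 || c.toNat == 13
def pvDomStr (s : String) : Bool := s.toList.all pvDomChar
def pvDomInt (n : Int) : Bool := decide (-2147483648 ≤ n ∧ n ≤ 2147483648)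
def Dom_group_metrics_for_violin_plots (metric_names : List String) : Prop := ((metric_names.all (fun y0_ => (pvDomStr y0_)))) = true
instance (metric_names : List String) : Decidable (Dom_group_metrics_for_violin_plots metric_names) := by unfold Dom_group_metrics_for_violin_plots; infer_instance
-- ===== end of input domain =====

-- B sorts the input once, then builds each bucket with a pure classifier and a filter pass (no per-bucket sorts); return value equivalence proved on all inputs.


-- ===== PORT A =====
-- one loop classifying each name into one of three accumulator lists, then each bucket sorted
def pvStepA (st : List String × List String × List String) (name : String) :
    List String × List String × List String :=
  let name_lower := PySem.Str.lower name
  if PySem.Str.isIn "per_" name_lower || PySem.Str.isIn "average_per" name_lower then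
    (st.1 ++ [name], st.2.1, st.2.2)
  else if PySem.Str.isIn "_rmse" name_lower then
    (st.1, st.2.1 ++ [name], st.2.2)
  else if ["recall", "precision", "f1", "accuracy"].any (fun x => PySem.Str.isIn x name_lower) then
    (st.1, st.2.1, st.2.2 ++ [name])
  else st

def group_metrics_for_violin_plots (metric_names : List String) : List (String × List String) :=
  let st := metric_names.foldl pvStepA ([], [], [])
  [("per_metrics", PySem.List.sorted st.1 (fun x => x) false),
   ("rmse_metrics", PySem.List.sorted st.2.1 (fun x => x) false),
   ("percentage_metrics", PySem.List.sorted st.2.2 (fun x => x) false)]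

-- ===== PORT B =====
-- pure classifier helper (port of _category in Source B)
def pvCategory (name : String) : Option String :=
  let nl := PySem.Str.lower name
  if PySem.Str.isIn "per_" nl || PySem.Str.isIn "average_per" nl then some "per_metrics"
  else if PySem.Str.isIn "_rmse" nl then some "rmse_metrics"
  else if ["recall", "precision", "f1", "accuracy"].any (fun x => PySem.Str.isIn x nl) then
    some "percentage_metrics"
  else none

def group_metrics_for_violin_plots_alt (metric_names : List String) : List (String × List String) :=
  let ordered := PySem.List.sorted metric_names (fun x => x) false
  ["per_metrics", "rmse_metrics", "percentage_metrics"].map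
    (fun key => (key, ordered.filter (fun n => pvCategory n == some key)))

-- ===== PRECONDITION & SPEC =====
def Spec_group_metrics_for_violin_plots (metric_names : List String) (out : List (String × List String)) : Prop := out = group_metrics_for_violin_plots_alt metric_names
instance (metric_names : List String) (out : List (String × List String)) : Decidable (Spec_group_metrics_for_violin_plots metric_names out) := by unfold Spec_group_metrics_for_violin_plots; infer_instance

-- ===== CLAIM (what is proved, stated in full; the proofs are below) =====
def Claim_equal_group_metrics_for_violin_plots : Prop := ∀ (metric_names : List String), Dom_group_metrics_for_violin_plots metric_names → Spec_group_metrics_for_violin_plots metric_names (group_metrics_for_violin_plots metric_names)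

-- ===== LEMMAS AND PROOFS =====

-- pvCategory takes exactly four values, and pvStepA acts according to it
theorem pvCategory_cases (n : String) :
    pvCategory n = some "per_metrics" ∨ pvCategory n = some "rmse_metrics" ∨
      pvCategory n = some "percentage_metrics" ∨ pvCategory n = none := by
  unfold pvCategory
  dsimp only
  split_ifs <;> simp

theorem pvStepA_eq_of_cat (st : List String × List String × List String) (n : String) :
    pvStepA st n =
      (if pvCategory n == some "per_metrics" then st.1 ++ [n] else st.1,
       if pvCategory n == some "rmse_metrics" then st.2.1 ++ [n] else st.2.1,
       if pvCategory n == some "percentage_metrics" then st.2.2 ++ [n] else st.2.2) := by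
  unfold pvStepA pvCategory
  dsimp only
  split_ifs <;> simp_all

-- A's loop accumulates exactly the three category filters
theorem foldl_stepA (xs : List String) (a b c : List String) :
    xs.foldl pvStepA (a, b, c) =
      (a ++ xs.filter (fun n => pvCategory n == some "per_metrics"),
       b ++ xs.filter (fun n => pvCategory n == some "rmse_metrics"),
       c ++ xs.filter (fun n => pvCategory n == some "percentage_metrics")) := by
  induction xs generalizing a b c with
  | nil => simp
  | cons n t ih =>
    rcases pvCategory_cases n with hc | hc | hc | hc
    · simp [List.foldl_cons, pvStepA_eq_of_cat, hc, ih]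
    · simp [List.foldl_cons, pvStepA_eq_of_cat, hc, ih]
    · simp [List.foldl_cons, pvStepA_eq_of_cat, hc, ih]
    · simp [List.foldl_cons, pvStepA_eq_of_cat, hc, ih]

-- filtering commutes with the (stable) sort: sorted(filter) = filter(sorted)
theorem sorted_filter (p : String → Bool) (xs : List String) :
    PySem.List.sorted (xs.filter p) (fun x => x) false =
      (PySem.List.sorted xs (fun x => x) false).filter p := by
  apply PySem.List.sorted_id_eq_of_perm_of_pairwise
  · exact (PySem.List.sorted_perm xs (fun x => x) false).filter p
  · exact (PySem.List.sorted_pairwise xs (fun x => x)).filter _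

-- ===== VERDICT (by name: the statement is the Claim_ definition above) =====
theorem group_metrics_for_violin_plots_spec : Claim_equal_group_metrics_for_violin_plots := by
  intro metric_names _
  show group_metrics_for_violin_plots metric_names = group_metrics_for_violin_plots_alt metric_names
  simp [group_metrics_for_violin_plots, group_metrics_for_violin_plots_alt,
    foldl_stepA, sorted_filter]
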